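-- pv_equiv track=rewrite | github.com/hyusterr/fin_rag | evaluation/metrics.py | get_spans_from_binary_labels
-- ===== SOURCE A (Python) =====
-- def get_spans_from_binary_labels(labels):
--     '''
--     labels: list of binary labels, e.g. [0, 1, 1, 0, 0, 1, 1, 0, ...]
--     '''
--     spans = []
--     tmp = []
--     for i, l in enumerate(labels):
--         if l == 1:
--             tmp.append(i)
--         else:
--             if tmp != []:
--                 spans.append(tmp)
--             tmp = []
--     # deal with the last span
--     if tmp != []:
--         spans.append(tmp)
--
--     if len(spans) == 0:
--         return [(-1, -1)], spans
--     # keep the span as the start and end index (exclude)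
--     spans_start_end = [(s[0], s[-1]+1) for s in spans]
--     return spans_start_end, spans
-- ===== SOURCE B (Python) =====
-- def get_spans_from_binary_labels(labels):
--     '''
--     labels: list of binary labels, e.g. [0, 1, 1, 0, 0, 1, 1, 0, ...]
--     '''
--     spans = []
--     i, n = 0, len(labels)
--     while i < n:
--         j = i + 1
--         while j < n and labels[j] == labels[i]:
--             j += 1
--         if labels[i] == 1:
--             spans.append(list(range(i, j)))
--         i = j
--     if not spans:
--         return [(-1, -1)], spans
--     return [(s[0], s[-1] + 1) for s in spans], spans
-- ===== Notes on version B (the rewrite author's own statement) =====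
-- stated objective: alternative
-- what changed: Replaces A's element-wise accumulator loop (enumerate with a tmp buffer flushed on non-1 labels) by a two-pointer run scan that peels each maximal run of equal labels at once and emits list(range(i,j)) for runs of 1s.
import Mathlib
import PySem

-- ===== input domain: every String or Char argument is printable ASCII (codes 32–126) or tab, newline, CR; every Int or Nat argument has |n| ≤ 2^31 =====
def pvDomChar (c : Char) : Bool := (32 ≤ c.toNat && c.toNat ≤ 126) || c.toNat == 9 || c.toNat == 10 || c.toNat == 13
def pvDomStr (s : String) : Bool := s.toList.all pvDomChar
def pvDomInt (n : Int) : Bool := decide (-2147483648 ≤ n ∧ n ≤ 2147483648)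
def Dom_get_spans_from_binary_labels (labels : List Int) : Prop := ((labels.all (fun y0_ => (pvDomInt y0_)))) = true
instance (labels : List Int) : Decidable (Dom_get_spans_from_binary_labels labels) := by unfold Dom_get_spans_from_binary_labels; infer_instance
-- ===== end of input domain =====

-- B replaces A's element-wise accumulator loop by a two-pointer run scan (alternative decomposition, same cost).


-- ===== PORT A =====
-- one iteration of A's 'for i, l in enumerate(labels)' body, state = (spans, tmp)
def stepA (st : List (List Int) × List Int) (p : Int × Int) : List (List Int) × List Int :=
  if p.2 = 1 then (st.1, st.2 ++ [p.1])
  else if st.2 ≠ [] then (st.1 ++ [st.2], []) else (st.1, [])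

def get_spans_from_binary_labels (labels : List Int) : (List (Int × Int)) × List (List Int) :=
  let st := (PySem.List.enumerate labels 0).foldl stepA ([], [])
  let spans := if st.2 ≠ [] then st.1 ++ [st.2] else st.1
  if spans.length = 0 then ([(-1, -1)], spans)
  else
    -- s[0] and s[-1] ported as headD/getLastD: exact here, every collected span is nonempty
    (spans.map (fun s => (s.headD 0, s.getLastD 0 + 1)), spans)

-- ===== PORT B =====
-- Source B's outer while: peel the maximal run of labels equal to labels[i] (the inner while j<n, labels[j]==labels[i] = takeWhile/dropWhile)
def runsB (ls : List Int) (i : Int) : List (List Int) :=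
  match ls with
  | [] => []
  | l :: rest =>
    let same := rest.takeWhile (· == l)
    let rest' := rest.dropWhile (· == l)
    let len : Int := (same.length : Int) + 1
    if l = 1 then PySem.List.pyRange i (i + len) 1 :: runsB rest' (i + len)
    else runsB rest' (i + len)
termination_by ls.length
decreasing_by all_goals exact Nat.lt_succ_of_le (List.length_dropWhile_le _ _)

def get_spans_from_binary_labels_alt (labels : List Int) : (List (Int × Int)) × List (List Int) :=
  let spans := runsB labels 0
  if spans = [] then ([(-1, -1)], spans)
  else
    -- s[0] and s[-1] ported as headD/getLastD: exact here, every emitted run is nonempty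
    (spans.map (fun s => (s.headD 0, s.getLastD 0 + 1)), spans)

-- ===== PRECONDITION & SPEC =====
def Spec_get_spans_from_binary_labels (labels : List Int) (out : (List (Int × Int)) × List (List Int)) : Prop := out = get_spans_from_binary_labels_alt labels
instance (labels : List Int) (out : (List (Int × Int)) × List (List Int)) : Decidable (Spec_get_spans_from_binary_labels labels out) := by unfold Spec_get_spans_from_binary_labels; infer_instance

-- ===== CLAIM (what is proved, stated in full; the proofs are below) =====
def Claim_equal_get_spans_from_binary_labels : Prop := ∀ (labels : List Int), Dom_get_spans_from_binary_labels labels → Spec_get_spans_from_binary_labels labels (get_spans_from_binary_labels labels)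

-- ===== LEMMAS AND PROOFS =====

-- common element-wise characterisation of the list of 1-runs
def S : List Int → Int → List Int → List (List Int)
  | [], _, tmp => if tmp ≠ [] then [tmp] else []
  | l :: ls, i, tmp =>
    if l = 1 then S ls (i + 1) (tmp ++ [i])
    else if tmp ≠ [] then tmp :: S ls (i + 1) [] else S ls (i + 1) []

theorem foldA_eq_S (ls : List Int) : ∀ (i : Int) (spans : List (List Int)) (tmp : List Int),
    (let st := (PySem.List.enumerate ls i).foldl stepA (spans, tmp);
     if st.2 ≠ [] then st.1 ++ [st.2] else st.1) = spans ++ S ls i tmp := by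
  induction ls with
  | nil =>
    intro i spans tmp
    simp only [PySem.List.enumerate_nil, List.foldl_nil, S]
    split <;> simp_all
  | cons l ls ih =>
    intro i spans tmp
    rw [PySem.List.enumerate_cons]
    simp only [List.foldl_cons, S, stepA]
    by_cases hl : l = 1
    · simp only [hl]
      exact ih (i + 1) spans (tmp ++ [i])
    · simp only [if_neg hl]
      by_cases ht : tmp = []
      · simp only [ht]
        simpa using ih (i + 1) spans []
      · simp only [ne_eq, ht, not_false_eq_true, if_true]
        rw [ih (i + 1) (spans ++ [tmp]) []]
        simp

theorem S_ones (xs : List Int) : ∀ (i : Int) (tmp ys : List Int), (∀ x ∈ xs, x = 1) →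
    S (xs ++ ys) i tmp = S ys (i + xs.length) (tmp ++ PySem.List.pyRange i (i + xs.length) 1) := by
  induction xs with
  | nil => intro i tmp ys _; simp [PySem.List.pyRange_one_eq_nil (by omega : (i:Int) ≤ i)]
  | cons x xs ih =>
    intro i tmp ys h
    have hx : x = 1 := h x (by simp)
    simp only [List.cons_append, S, if_pos hx]
    rw [ih (i + 1) (tmp ++ [i]) ys (fun y hy => h y (by simp [hy]))]
    have hlen : (((x :: xs).length : Nat) : Int) = (xs.length : Int) + 1 := by
      simp only [List.length_cons]; push_cast; ring
    rw [hlen]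
    have h1 : i + ((xs.length : Int) + 1) = i + 1 + xs.length := by omega
    rw [h1]
    have hcons : tmp ++ PySem.List.pyRange i (i + 1 + (xs.length : Int)) 1
        = (tmp ++ [i]) ++ PySem.List.pyRange (i + 1) (i + 1 + (xs.length : Int)) 1 := by
      rw [PySem.List.pyRange_one_cons (a := i) (b := i + 1 + (xs.length : Int)) (by omega)]
      simp
    rw [hcons]

theorem S_skip (xs : List Int) : ∀ (i : Int) (ys : List Int), (∀ x ∈ xs, x ≠ 1) →
    S (xs ++ ys) i [] = S ys (i + xs.length) [] := by
  induction xs with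
  | nil => intro i ys _; simp
  | cons x xs ih =>
    intro i ys h
    have hx : x ≠ 1 := h x (by simp)
    simp only [List.cons_append, S, if_neg hx, ne_eq, not_true_eq_false, reduceIte]
    rw [ih (i + 1) ys (fun y hy => h y (by simp [hy]))]
    congr 1
    simp only [List.length_cons]
    push_cast
    omega

theorem S_pop (ls : List Int) (i : Int) (tmp : List Int) (htmp : tmp ≠ [])
    (hhead : ∀ l ∈ ls.head?, l ≠ 1) : S ls i tmp = tmp :: S ls i [] := by
  cases ls with
  | nil => simp [S, htmp]
  | cons l rest =>
    have hl : l ≠ 1 := hhead l (by simp)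
    simp [S, hl, htmp]

theorem head?_dropWhile_false (p : Int → Bool) (l : List Int) :
    ∀ x ∈ (l.dropWhile p).head?, p x = false := by
  induction l with
  | nil => simp
  | cons a t ih =>
    intro x hx
    rw [List.dropWhile_cons] at hx
    split at hx
    · exact ih x hx
    · simp_all

theorem runsB_eq_S (ls : List Int) (i : Int) : runsB ls i = S ls i [] := by
  match ls with
  | [] => simp [runsB, S]
  | l :: rest =>
    have hsplit : rest.takeWhile (· == l) ++ rest.dropWhile (· == l) = rest :=
      List.takeWhile_append_dropWhile
    have hsame : ∀ x ∈ rest.takeWhile (· == l), x = l := by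
      intro x hx
      simpa using List.mem_takeWhile_imp hx
    have hhead : ∀ x ∈ (rest.dropWhile (· == l)).head?, x ≠ l := by
      intro x hx
      have := head?_dropWhile_false (· == l) rest x hx
      simpa using this
    have ihr := runsB_eq_S (rest.dropWhile (· == l))
      (i + (((rest.takeWhile (· == l)).length : Int) + 1))
    rw [runsB]
    by_cases hl : l = 1
    · subst hl
      rw [if_pos rfl, ihr]
      conv_rhs => rw [S, if_pos rfl, List.nil_append, ← hsplit]
      rw [S_ones _ _ _ _ (fun x hx => hsame x hx)]
      have hb : (i : Int) + 1 + ((rest.takeWhile (· == (1:Int))).length : Int)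
          = i + (((rest.takeWhile (· == (1:Int))).length : Int) + 1) := by omega
      rw [hb]
      have hcons : ([i] : List Int)
            ++ PySem.List.pyRange (i + 1) (i + (((rest.takeWhile (· == (1:Int))).length : Int) + 1)) 1
          = PySem.List.pyRange i (i + (((rest.takeWhile (· == (1:Int))).length : Int) + 1)) 1 := by
        rw [PySem.List.pyRange_one_cons
          (a := i) (b := i + (((rest.takeWhile (· == (1:Int))).length : Int) + 1)) (by omega)]
        simp
      rw [hcons]
      rw [S_pop (rest.dropWhile (· == (1:Int)))
        (i + (((rest.takeWhile (· == (1:Int))).length : Int) + 1))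
        (PySem.List.pyRange i (i + (((rest.takeWhile (· == (1:Int))).length : Int) + 1)) 1)
        (by
          rw [PySem.List.pyRange_one_cons
            (a := i) (b := i + (((rest.takeWhile (· == (1:Int))).length : Int) + 1)) (by omega)]
          simp)
        (fun x hx => hhead x hx)]
    · rw [if_neg hl, ihr]
      conv_rhs => rw [S, if_neg hl]
      simp only [ne_eq, not_true_eq_false, if_false]
      conv_rhs => rw [← hsplit]
      rw [S_skip _ _ _ (fun x hx => by rw [hsame x hx]; exact hl)]
      congr 1
      omega
termination_by ls.length
decreasing_by exact Nat.lt_succ_of_le (List.length_dropWhile_le _ _)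

-- ===== VERDICT (by name: the statement is the Claim_ definition above) =====
theorem get_spans_from_binary_labels_spec : Claim_equal_get_spans_from_binary_labels := by
  intro labels _
  unfold Spec_get_spans_from_binary_labels get_spans_from_binary_labels get_spans_from_binary_labels_alt
  simp only []
  have hA := foldA_eq_S labels 0 [] []
  simp only [List.nil_append] at hA
  rw [hA, runsB_eq_S]
  simp only [List.length_eq_zero_iff]
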